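-- pv_equiv track=rewrite | github.com/az0627upup/test1 | Leedcode/tanxin/452.py | get_non_overlap_intervals
-- ===== SOURCE A (Python) =====
-- def get_non_overlap_intervals(intervals) -> int:
--     """ 求不重叠区间个数 """
--     result = 1
--     _intervals = sorted(intervals, key=lambda x: x[1])
--     # 第一个区间的终点
--     end_position = _intervals[0][1]
--     for interval in _intervals[1:]:
--         # 不重叠区间：区间起点大于区间终点
--         if interval[0] > end_position:
--             result += 1
--             end_position = interval[1]
--     return result
-- ===== SOURCE B (Python) =====
-- def get_non_overlap_intervals(intervals) -> int:
--     """ 求不重叠区间个数 """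
--     remaining = list(intervals)
--     first = min(remaining, key=lambda x: x[1])
--     remaining.remove(first)
--     end_position = first[1]
--     result = 1
--     while True:
--         candidates = [iv for iv in remaining if iv[0] > end_position]
--         if not candidates:
--             return result
--         pick = min(candidates, key=lambda x: x[1])
--         remaining.remove(pick)
--         end_position = pick[1]
--         result += 1
-- ===== Notes on version B (the rewrite author's own statement) =====
-- stated objective: alternative
-- what changed: B drops A's sort-then-scan entirely: it extracts the first minimal-end interval, then repeatedly filters the remaining intervals to those starting after the current end and removes the first minimal-end candidate, counting each pick.
import Mathlib
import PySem

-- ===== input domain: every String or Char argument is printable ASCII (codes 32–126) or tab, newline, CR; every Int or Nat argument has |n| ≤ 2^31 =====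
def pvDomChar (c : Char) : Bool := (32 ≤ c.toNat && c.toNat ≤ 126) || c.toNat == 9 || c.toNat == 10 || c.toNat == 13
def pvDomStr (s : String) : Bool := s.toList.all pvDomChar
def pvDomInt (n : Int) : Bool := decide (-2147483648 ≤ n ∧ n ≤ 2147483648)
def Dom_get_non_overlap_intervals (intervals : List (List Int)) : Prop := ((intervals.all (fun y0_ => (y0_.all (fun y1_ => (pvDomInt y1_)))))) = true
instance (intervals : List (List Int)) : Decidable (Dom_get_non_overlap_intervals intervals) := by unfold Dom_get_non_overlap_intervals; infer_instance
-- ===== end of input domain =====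

-- B replaces A's sort-then-scan greedy with a selection greedy (repeated first-minimal-end
-- extraction, no sorting); same return value on every input A accepts (objective: alternative).

-- ===== PORT A =====
-- Literal port of A. Python raises (IndexError on empty input / on an inner list shorter
-- than 2) exactly where Pre_ fails; there pyGetD's defaults stand in for the exception.
def get_non_overlap_intervals (intervals : List (List Int)) : Int :=
  let s := PySem.List.sorted intervals (fun x => PySem.List.pyGetD x 1 0) false
  let endPos := PySem.List.pyGetD (PySem.List.pyGetD s 0 []) 1 0
  (List.foldl
    (fun (acc : Int × Int) interval =>
      if PySem.List.pyGetD interval 0 0 > acc.2 then (acc.1 + 1, PySem.List.pyGetD interval 1 0)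
      else acc)
    (1, endPos) (PySem.List.slice s (some 1) none)).1

-- ===== PORT B =====
-- termination helper for pvLoopB: list.remove of a member strictly shrinks the list
theorem pvRemoveLen (xs : List (List Int)) (v : List Int) (hv : v ∈ xs) :
    ((PySem.List.remove? xs v).getD xs).length < xs.length := by
  have hidx : ∃ k, List.idxOf? v xs = some k := by
    have := List.isSome_idxOf?.mpr hv
    exact Option.isSome_iff_exists.mp this
  rcases hidx with ⟨k, hk⟩
  have hklt : k < xs.length := by
    rcases List.idxOf?_eq_some_iff.mp hk with ⟨h, -⟩
    exact h
  simp [PySem.List.remove?, hk, List.length_eraseIdx, hklt]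
  omega

-- the 'while True' loop of Source B: candidates, first-minimal-end pick, remove, repeat
def pvLoopB (remaining : List (List Int)) (endPos result : Int) : Int :=
  match h : PySem.List.min?
      (remaining.filter (fun iv => decide (PySem.List.pyGetD iv 0 0 > endPos)))
      (fun x => PySem.List.pyGetD x 1 0) with
  | none => result
  | some pick =>
      pvLoopB ((PySem.List.remove? remaining pick).getD remaining)
        (PySem.List.pyGetD pick 1 0) (result + 1)
termination_by remaining.length
decreasing_by
  exact pvRemoveLen remaining pick (List.mem_of_mem_filter (PySem.List.min?_mem h))

-- Literal port of B (Source B). Python's min raises ValueError on an empty list: outside Pre_;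
-- the none branch returns a dummy 0 there.
def get_non_overlap_intervals_alt (intervals : List (List Int)) : Int :=
  let remaining := intervals
  match PySem.List.min? remaining (fun x => PySem.List.pyGetD x 1 0) with
  | none => 0
  | some first =>
      pvLoopB ((PySem.List.remove? remaining first).getD remaining)
        (PySem.List.pyGetD first 1 0) 1

-- ===== PRECONDITION & SPEC =====
-- Pre_ = exactly where Python A returns: a nonempty list whose elements all have length ≥ 2
-- (otherwise A raises IndexError via _intervals[0] or the sort key x[1]).
def Pre_get_non_overlap_intervals (intervals : List (List Int)) : Prop :=
  intervals ≠ [] ∧ ∀ iv ∈ intervals, 2 ≤ iv.length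
instance (intervals : List (List Int)) : Decidable (Pre_get_non_overlap_intervals intervals) := by
  unfold Pre_get_non_overlap_intervals; infer_instance

def pvWitness_get_non_overlap_intervals : List (List Int) := [[1, 2], [3, 4], [2, 3]]

def Spec_get_non_overlap_intervals (intervals : List (List Int)) (out : Int) : Prop := out = get_non_overlap_intervals_alt intervals
instance (intervals : List (List Int)) (out : Int) : Decidable (Spec_get_non_overlap_intervals intervals out) := by unfold Spec_get_non_overlap_intervals; infer_instance

-- ===== CLAIM (what is proved, stated in full; the proofs are below) =====
def Claim_equal_get_non_overlap_intervals : Prop := ∀ (intervals : List (List Int)), Dom_get_non_overlap_intervals intervals → Pre_get_non_overlap_intervals intervals → Spec_get_non_overlap_intervals intervals (get_non_overlap_intervals intervals)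

-- ===== LEMMAS AND PROOFS =====

-- start / end of an interval, as the ports read them
def pvSt (x : List Int) : Int := PySem.List.pyGetD x 0 0
def pvEn (x : List Int) : Int := PySem.List.pyGetD x 1 0

def pvKey : List Int → Int := fun x => PySem.List.pyGetD x 1 0

@[simp] theorem pvKey_eq (x : List Int) : pvKey x = pvEn x := rfl

def pvSortedEn (R : List (List Int)) : List (List Int) := PySem.List.sorted R pvKey false

-- A's scan, abstracted from the tuple fold
def pvCountA (b : Int) : List (List Int) → Int
  | [] => 0
  | x :: L => if pvSt x > b then 1 + pvCountA (pvEn x) L else pvCountA b L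

-- list.remove of Python, rephrased as List.erase
theorem pvRemoveGetD (xs : List (List Int)) (v : List Int) :
    (PySem.List.remove? xs v).getD xs = xs.erase v := by
  rw [List.erase_eq_eraseIdx]
  show ((List.idxOf? v xs).map xs.eraseIdx).getD xs = _
  cases List.idxOf? v xs <;> simp

-- insertion used by PySem's stable sort (strict) and the tie-front insertion (non-strict)
def pvIns (z : List Int) (L : List (List Int)) : List (List Int) :=
  PySem.List.insertBy (fun a b => decide (pvKey a < pvKey b)) z L
def pvInsF (x : List Int) (L : List (List Int)) : List (List Int) :=
  PySem.List.insertBy (fun a b => decide (pvKey a ≤ pvKey b)) x L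

theorem pvIns_nil (z : List Int) : pvIns z [] = [z] := rfl
theorem pvIns_cons (z y : List Int) (L : List (List Int)) :
    pvIns z (y :: L) = if pvEn z < pvEn y then z :: y :: L else y :: pvIns z L := by
  by_cases h : pvEn z < pvEn y <;> simp [pvIns, PySem.List.insertBy, h]
theorem pvInsF_nil (x : List Int) : pvInsF x [] = [x] := rfl
theorem pvInsF_cons (x y : List Int) (L : List (List Int)) :
    pvInsF x (y :: L) = if pvEn x ≤ pvEn y then x :: y :: L else y :: pvInsF x L := by
  by_cases h : pvEn x ≤ pvEn y <;> simp [pvInsF, PySem.List.insertBy, h]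

-- stability workhorse: the two insertions commute
theorem pvComm (L : List (List Int)) (x z : List Int) :
    pvIns z (pvInsF x L) = pvInsF x (pvIns z L) := by
  induction L with
  | nil =>
      by_cases h : pvEn z < pvEn x
      · rw [pvInsF_nil, pvIns_cons z x [], if_pos h, pvIns_nil,
          pvInsF_cons x z [], if_neg (show ¬ pvEn x ≤ pvEn z by omega), pvInsF_nil]
      · rw [pvInsF_nil, pvIns_cons z x [], if_neg h, pvIns_nil,
          pvInsF_cons x z [], if_pos (show pvEn x ≤ pvEn z by omega)]
  | cons y L ih =>
      by_cases hxy : pvEn x ≤ pvEn y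
      · by_cases hzy : pvEn z < pvEn y
        · by_cases hzx : pvEn z < pvEn x
          · rw [pvInsF_cons x y L, if_pos hxy, pvIns_cons z x (y :: L), if_pos hzx,
              pvIns_cons z y L, if_pos hzy, pvInsF_cons x z (y :: L),
              if_neg (show ¬ pvEn x ≤ pvEn z by omega), pvInsF_cons x y L, if_pos hxy]
          · rw [pvInsF_cons x y L, if_pos hxy, pvIns_cons z x (y :: L), if_neg hzx,
              pvIns_cons z y L, if_pos hzy, pvInsF_cons x z (y :: L),
              if_pos (show pvEn x ≤ pvEn z by omega)]
        · rw [pvInsF_cons x y L, if_pos hxy, pvIns_cons z x (y :: L),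
            if_neg (show ¬ pvEn z < pvEn x by omega), pvIns_cons z y L, if_neg hzy,
            pvInsF_cons x y (pvIns z L), if_pos hxy]
      · by_cases hzy : pvEn z < pvEn y
        · rw [pvInsF_cons x y L, if_neg hxy, pvIns_cons z y (pvInsF x L), if_pos hzy,
            pvIns_cons z y L, if_pos hzy, pvInsF_cons x z (y :: L),
            if_neg (show ¬ pvEn x ≤ pvEn z by omega), pvInsF_cons x y L, if_neg hxy]
        · rw [pvInsF_cons x y L, if_neg hxy, pvIns_cons z y (pvInsF x L), if_neg hzy,
            pvIns_cons z y L, if_neg hzy, pvInsF_cons x y (pvIns z L), if_neg hxy, ih]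

theorem pvSortedEn_foldl (L : List (List Int)) :
    pvSortedEn L = L.foldl (fun acc t => pvIns t acc) [] :=
  PySem.List.sorted_eq_foldl_insertBy L pvKey

-- stable sort, one element at the head of the input
theorem pvSorted_cons (x : List Int) (R : List (List Int)) :
    pvSortedEn (x :: R) = pvInsF x (pvSortedEn R) := by
  induction R using List.reverseRecOn with
  | nil => rfl
  | append_singleton R z ih =>
      have h1 : pvSortedEn (x :: (R ++ [z])) = pvIns z (pvSortedEn (x :: R)) := by
        rw [pvSortedEn_foldl, pvSortedEn_foldl, show x :: (R ++ [z]) = (x :: R) ++ [z] from rfl,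
          List.foldl_append]
        rfl
      rw [h1, ih, pvComm, pvSortedEn_foldl, pvSortedEn_foldl (R ++ [z]), List.foldl_append]
      rfl

theorem pvInsF_eq (x : List Int) (L : List (List Int)) :
    pvInsF x L = L.takeWhile (fun y => decide (pvEn y < pvEn x)) ++
      x :: L.dropWhile (fun y => decide (pvEn y < pvEn x)) := by
  induction L with
  | nil => rfl
  | cons y L ih =>
      by_cases h : pvEn y < pvEn x
      · rw [pvInsF_cons, if_neg (by omega), List.takeWhile_cons_of_pos (by simpa using h),
          List.dropWhile_cons_of_pos (by simpa using h), ih, List.cons_append]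
      · rw [pvInsF_cons, if_pos (by omega), List.takeWhile_cons_of_neg (by simpa using h),
          List.dropWhile_cons_of_neg (by simpa using h), List.nil_append]

theorem pvInsF_skip (x : List Int) (L1 L2 : List (List Int))
    (h : ∀ p ∈ L1, pvEn p < pvEn x) : pvInsF x (L1 ++ L2) = L1 ++ pvInsF x L2 := by
  induction L1 with
  | nil => rfl
  | cons p L1 ih =>
      rw [List.cons_append, pvInsF_cons, if_neg (by have := h p (by simp); omega),
        ih (fun q hq => h q (by simp [hq])), List.cons_append]

theorem pvInsF_front (x : List Int) (L : List (List Int))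
    (h : ∀ y ∈ L, pvEn x ≤ pvEn y) : pvInsF x L = x :: L := by
  cases L with
  | nil => rfl
  | cons y L => rw [pvInsF_cons, if_pos (h y (by simp))]

-- min? with the end key, as a running first-minimum
def pvRunMin (m : List Int) : List (List Int) → List Int
  | [] => m
  | y :: C => pvRunMin (if pvEn y < pvEn m then y else m) C

theorem pvMinAux (C : List (List Int)) : ∀ (x : List Int),
    PySem.List.min? (x :: C) pvKey = some (pvRunMin x C) := by
  induction C with
  | nil => intro x; rfl
  | cons y C ih =>
      intro x
      have hstep : PySem.List.min? (x :: y :: C) pvKey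
          = PySem.List.min? ((if pvEn y < pvEn x then y else x) :: C) pvKey := by
        by_cases hc : pvEn y < pvEn x <;> simp [PySem.List.min?, List.foldl_cons, hc]
      rw [hstep, ih, pvRunMin]

theorem pvMin_cons (x : List Int) (C : List (List Int)) :
    PySem.List.min? (x :: C) pvKey = some (pvRunMin x C) := pvMinAux C x

theorem pvRunMin_self (x : List Int) (C : List (List Int))
    (h : ∀ y ∈ C, ¬ pvEn y < pvEn x) : pvRunMin x C = x := by
  induction C with
  | nil => rfl
  | cons y C ih =>
      rw [pvRunMin, if_neg (h y (by simp))]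
      exact ih (fun q hq => h q (by simp [hq]))

theorem pvRunMin_irrel (C : List (List Int)) : ∀ (x y : List Int), pvEn x ≤ pvEn y →
    (∃ z ∈ C, pvEn z < pvEn x) → pvRunMin x C = pvRunMin y C := by
  induction C with
  | nil => intro x y _ h; simp at h
  | cons w C ih =>
      intro x y hxy h
      by_cases hw : pvEn w < pvEn x
      · rw [pvRunMin, if_pos hw, pvRunMin, if_pos (by omega)]
      · rw [pvRunMin, if_neg hw, pvRunMin]
        rcases h with ⟨z, hz, hzx⟩
        have hz' : z ∈ C := by
          rcases List.mem_cons.mp hz with h1 | h1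
          · subst h1; omega
          · exact h1
        by_cases hwy : pvEn w < pvEn y
        · rw [if_pos hwy]; exact ih x w (by omega) ⟨z, hz', hzx⟩
        · rw [if_neg hwy]; exact ih x y hxy ⟨z, hz', hzx⟩

theorem pvMin_cons_skip (x : List Int) (C : List (List Int))
    (h : ∃ z ∈ C, pvEn z < pvEn x) :
    PySem.List.min? (x :: C) pvKey = PySem.List.min? C pvKey := by
  rcases C with - | ⟨c0, C'⟩
  · simp at h
  rw [pvMin_cons, pvMin_cons, pvRunMin]
  by_cases h0 : pvEn c0 < pvEn x
  · rw [if_pos h0]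
  · rw [if_neg h0]
    rcases h with ⟨z, hz, hzx⟩
    have hz' : z ∈ C' := by
      rcases List.mem_cons.mp hz with h1 | h1
      · subst h1; omega
      · exact h1
    rw [pvRunMin_irrel C' x c0 (by omega) ⟨z, hz', hzx⟩]

-- the decomposition: the stable sort splits at the first minimal-end candidate, and
-- removing that candidate from the input removes exactly that position of the sort
theorem pvDecomp (R : List (List Int)) (q : List Int → Bool) (c : List Int)
    (hmin : PySem.List.min? (R.filter q) pvKey = some c) :
    ∃ P S, pvSortedEn R = P ++ c :: S ∧ pvSortedEn (R.erase c) = P ++ S ∧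
      ∀ p ∈ P, q p = false ∧ pvEn p ≤ pvEn c := by
  induction R with
  | nil => simp [PySem.List.min?] at hmin
  | cons x R' ih =>
      have hmem := PySem.List.min?_mem hmin
      have hqc : q c = true := (List.mem_filter.mp hmem).2
      have hisMin := PySem.List.min?_isMin hmin
      by_cases hxc : x = c
      · subst hxc
        refine ⟨(pvSortedEn R').takeWhile (fun y => decide (pvEn y < pvEn x)),
          (pvSortedEn R').dropWhile (fun y => decide (pvEn y < pvEn x)), ?_, ?_, ?_⟩
        · rw [pvSorted_cons, pvInsF_eq]
        · rw [List.erase_cons_head, List.takeWhile_append_dropWhile]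
        · intro p hp
          have hpx : pvEn p < pvEn x := by simpa using List.mem_takeWhile_imp hp
          have hpR : p ∈ R' := by
            rw [← PySem.List.mem_sorted R' pvKey false]
            exact (List.takeWhile_sublist _).subset hp
          refine ⟨?_, by omega⟩
          by_contra hqp
          have : p ∈ (x :: R').filter q := by
            rw [List.mem_filter]
            exact ⟨by simp [hpR], by simpa using hqp⟩
          have := hisMin p this
          simp at this; omega
      · -- the pick comes from R'
        have hmin' : PySem.List.min? (R'.filter q) pvKey = some c := by
          by_cases hqx : q x = true
          · rw [List.filter_cons_of_pos hqx] at hmin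
            have hex : ∃ z ∈ R'.filter q, pvEn z < pvEn x := by
              by_contra hno
              push_neg at hno
              rw [pvMin_cons, pvRunMin_self x _ (fun y hy => by have := hno y hy; omega)] at hmin
              exact hxc (Option.some.inj hmin)
            rw [← pvMin_cons_skip x _ hex]; exact hmin
          · rwa [List.filter_cons_of_neg (by simpa using hqx)] at hmin
        obtain ⟨P', S', hsort', herase', hprops'⟩ := ih hmin'
        have hmem' := PySem.List.min?_mem hmin'
        have hisMin' := PySem.List.min?_isMin hmin'
        have herasex : (x :: R').erase c = x :: R'.erase c :=
          List.erase_cons_tail (by simpa using hxc)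
        have hSx : pvSortedEn (x :: R') = pvInsF x (P' ++ c :: S') := by
          rw [pvSorted_cons, hsort']
        have hEx : pvSortedEn ((x :: R').erase c) = pvInsF x (P' ++ S') := by
          rw [herasex, pvSorted_cons, herase']
        have hS'ge : ∀ y ∈ S', pvEn c ≤ pvEn y := by
          have hp := PySem.List.sorted_pairwise R' pvKey
          rw [show PySem.List.sorted R' pvKey = pvSortedEn R' from rfl, hsort'] at hp
          have := (List.pairwise_append.mp hp).2.1
          intro y hy
          simpa using (List.pairwise_cons.mp this).1 y hy
        by_cases hqx : q x = true
        · -- x is itself a candidate, so the pick's end is strictly below x's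
          have hex : ∃ z ∈ R'.filter q, pvEn z < pvEn x := by
            by_contra hno
            push_neg at hno
            rw [List.filter_cons_of_pos hqx, pvMin_cons,
              pvRunMin_self x _ (fun y hy => by have := hno y hy; omega)] at hmin
            exact hxc (Option.some.inj hmin)
          rcases hex with ⟨z, hz, hzx⟩
          have hcx : pvEn c < pvEn x := by
            have := hisMin' z hz; simp at this; omega
          refine ⟨P', pvInsF x S', ?_, ?_, hprops'⟩
          · rw [hSx, show P' ++ c :: S' = (P' ++ [c]) ++ S' by simp,
              pvInsF_skip x (P' ++ [c]) S' ?_]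
            · simp
            · intro p hp
              rcases List.mem_append.mp hp with h1 | h1
              · have := (hprops' p h1).2; omega
              · simp at h1; subst h1; omega
          · rw [hEx, pvInsF_skip x P' S' (fun p hp => by have := (hprops' p hp).2; omega)]
        · -- x is not a candidate
          by_cases hall : ∀ p ∈ P', pvEn p < pvEn x
          · by_cases hxc2 : pvEn x ≤ pvEn c
            · refine ⟨P' ++ [x], S', ?_, ?_, ?_⟩
              · rw [hSx, pvInsF_skip x P' _ hall, pvInsF_cons, if_pos hxc2]
                simp
              · rw [hEx, pvInsF_skip x P' _ hall,
                  pvInsF_front x S' (fun y hy => by have := hS'ge y hy; omega)]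
                simp
              · intro p hp
                rcases List.mem_append.mp hp with h1 | h1
                · exact hprops' p h1
                · simp at h1; subst h1
                  exact ⟨by simpa using hqx, hxc2⟩
            · refine ⟨P', pvInsF x S', ?_, ?_, hprops'⟩
              · rw [hSx, pvInsF_skip x P' _ hall, pvInsF_cons, if_neg hxc2]
              · rw [hEx, pvInsF_skip x P' _ hall]
          · -- x is inserted inside P'
            have htw : (P'.takeWhile (fun y => decide (pvEn y < pvEn x))).length ≠ P'.length := by
              intro hlen
              apply hall
              intro p hp
              have : P'.takeWhile (fun y => decide (pvEn y < pvEn x)) = P' :=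
                (List.takeWhile_sublist _).eq_of_length hlen
              rw [← this] at hp
              simpa using List.mem_takeWhile_imp hp
            have hdw : (P'.dropWhile (fun y => decide (pvEn y < pvEn x))) ≠ [] := by
              intro hnil
              apply htw
              have := List.takeWhile_append_dropWhile
                (p := fun y => decide (pvEn y < pvEn x)) (l := P')
              rw [hnil, List.append_nil] at this
              rw [this]
            refine ⟨P'.takeWhile (fun y => decide (pvEn y < pvEn x)) ++
              x :: P'.dropWhile (fun y => decide (pvEn y < pvEn x)), S', ?_, ?_, ?_⟩
            · rw [hSx, pvInsF_eq, List.takeWhile_append, if_neg htw, List.dropWhile_append,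
                if_neg (by simpa using hdw)]
              simp
            · rw [hEx, pvInsF_eq, List.takeWhile_append, if_neg htw, List.dropWhile_append,
                if_neg (by simpa using hdw)]
              simp
            · intro p hp
              have hPmem : ∀ r ∈ P', q r = false ∧ pvEn r ≤ pvEn c := hprops'
              rcases List.mem_append.mp hp with h1 | h1
              · exact hPmem p ((List.takeWhile_sublist _).subset h1)
              · rcases List.mem_cons.mp h1 with h2 | h2
                · rw [h2]
                  have hd0 := List.head_dropWhile_not
                    (fun y => decide (pvEn y < pvEn x)) hdw
                  have hd0mem : (P'.dropWhile (fun y => decide (pvEn y < pvEn x))).head hdw ∈ P' :=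
                    (List.dropWhile_sublist _).subset (List.head_mem hdw)
                  have := (hPmem _ hd0mem).2
                  simp at hd0
                  exact ⟨by simpa using hqx, by omega⟩
                · exact hPmem p ((List.dropWhile_sublist _).subset h2)

theorem pvCountA_skip (b : Int) (P M : List (List Int)) (h : ∀ p ∈ P, ¬ pvSt p > b) :
    pvCountA b (P ++ M) = pvCountA b M := by
  induction P with
  | nil => rfl
  | cons p P ih =>
      rw [List.cons_append, pvCountA, if_neg (h p (by simp))]
      exact ih (fun r hr => h r (by simp [hr]))

theorem pvFoldA (L : List (List Int)) : ∀ (r e : Int),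
    (List.foldl
      (fun (acc : Int × Int) interval =>
        if PySem.List.pyGetD interval 0 0 > acc.2 then (acc.1 + 1, PySem.List.pyGetD interval 1 0)
        else acc) (r, e) L).1 = r + pvCountA e L := by
  induction L with
  | nil => intro r e; simp [pvCountA]
  | cons x L ih =>
      intro r e
      by_cases h : PySem.List.pyGetD x 0 0 > e
      · rw [List.foldl_cons, if_pos h, ih, pvCountA, if_pos (by simpa [pvSt] using h)]
        show r + 1 + pvCountA (pvEn x) L = r + (1 + pvCountA (pvEn x) L)
        omega
      · rw [List.foldl_cons, if_neg h, ih, pvCountA, if_neg (by simpa [pvSt] using h)]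

theorem pvMain (n : Nat) : ∀ (R : List (List Int)) (b r : Int), R.length ≤ n →
    (∀ x ∈ R, pvSt x > b → b ≤ pvEn x) →
    pvLoopB R b r = r + pvCountA b (pvSortedEn R) := by
  induction n with
  | zero =>
      intro R b r hlen _
      have hR : R = [] := List.length_eq_zero_iff.mp (Nat.le_zero.mp hlen)
      subst hR
      rw [pvLoopB]
      split
      · show r = r + pvCountA b (pvSortedEn [])
        show r = r + 0
        omega
      · next pick h => simp [PySem.List.min?] at h
  | succ n ih =>
      intro R b r hlen hinv
      rw [pvLoopB]
      cases hmin : PySem.List.min?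
          (R.filter (fun iv => decide (PySem.List.pyGetD iv 0 0 > b)))
          (fun x => PySem.List.pyGetD x 1 0) with
      | none =>
          have hfil : R.filter (fun iv => decide (PySem.List.pyGetD iv 0 0 > b)) = [] :=
            (PySem.List.min?_eq_none_iff _ _).mp hmin
          have hno : ∀ x ∈ R, ¬ pvSt x > b := by
            intro x hx hgt
            have : x ∈ R.filter (fun iv => decide (PySem.List.pyGetD iv 0 0 > b)) :=
              List.mem_filter.mpr ⟨hx, by simpa [pvSt] using hgt⟩
            rw [hfil] at this; simp at this
          have : pvCountA b (pvSortedEn R) = 0 := by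
            have := pvCountA_skip b (pvSortedEn R) [] (fun p hp =>
              hno p ((PySem.List.mem_sorted R pvKey false p).mp hp))
            simpa using this
          simp [this]
      | some c =>
          have hminK : PySem.List.min?
              (R.filter (fun iv => decide (pvSt iv > b))) pvKey = some c := hmin
          have hmemf := PySem.List.min?_mem hminK
          have hcR : c ∈ R := (List.mem_filter.mp hmemf).1
          have hqc : pvSt c > b := by simpa using (List.mem_filter.mp hmemf).2
          have hbc : b ≤ pvEn c := hinv c hcR hqc
          have hisMin := PySem.List.min?_isMin hminK
          obtain ⟨P, S, hsort, herase, hprops⟩ := pvDecomp R _ c hminK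
          have hPskip : ∀ p ∈ P, ¬ pvSt p > b := by
            intro p hp
            have := (hprops p hp).1
            simpa using this
          have hAcount : pvCountA b (pvSortedEn R) = 1 + pvCountA (pvEn c) S := by
            rw [hsort, pvCountA_skip b P _ hPskip, pvCountA, if_pos hqc]
          have hAcount' : pvCountA (pvEn c) (pvSortedEn (R.erase c)) = pvCountA (pvEn c) S := by
            rw [herase]
            exact pvCountA_skip _ P S (fun p hp => by
              have h1 := hPskip p hp
              omega)
          have hlen' : (R.erase c).length ≤ n := by
            have := List.length_erase_of_mem hcR
            omega
          have hinv' : ∀ x ∈ R.erase c, pvSt x > pvEn c → pvEn c ≤ pvEn x := by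
            intro x hx hgt
            have hxR : x ∈ R := List.mem_of_mem_erase hx
            have hxq : pvSt x > b := by omega
            have : x ∈ R.filter (fun iv => decide (pvSt iv > b)) :=
              List.mem_filter.mpr ⟨hxR, by simpa using hxq⟩
            have := hisMin x this
            simpa using this
          show pvLoopB ((PySem.List.remove? R c).getD R) (PySem.List.pyGetD c 1 0) (r + 1)
            = r + pvCountA b (pvSortedEn R)
          rw [pvRemoveGetD, show PySem.List.pyGetD c 1 0 = pvEn c from rfl,
            ih (R.erase c) (pvEn c) (r + 1) hlen' hinv', hAcount', hAcount]
          omega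


-- ===== VERDICT (by name: the statement is the Claim_ definition above) =====
theorem get_non_overlap_intervals_spec : Claim_equal_get_non_overlap_intervals := by
  intro intervals _ hpre
  unfold Spec_get_non_overlap_intervals
  obtain ⟨hne, -⟩ := hpre
  cases hminI : PySem.List.min? intervals (fun x => PySem.List.pyGetD x 1 0) with
  | none => exact absurd ((PySem.List.min?_eq_none_iff _ _).mp hminI) hne
  | some first =>
      have hminK : PySem.List.min? (intervals.filter (fun _ => true)) pvKey = some first := by
        rw [List.filter_true]; exact hminI
      obtain ⟨P, S, hsort, herase, hprops⟩ := pvDecomp intervals _ first hminK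
      have hP : P = [] := by
        cases P with
        | nil => rfl
        | cons p P' => exact absurd (hprops p (by simp)).1 (by simp)
      subst hP
      rw [List.nil_append] at hsort herase
      have hA : get_non_overlap_intervals intervals = 1 + pvCountA (pvEn first) S := by
        show (List.foldl
            (fun (acc : Int × Int) interval =>
              if PySem.List.pyGetD interval 0 0 > acc.2 then
                (acc.1 + 1, PySem.List.pyGetD interval 1 0)
              else acc)
            (1, PySem.List.pyGetD
              (PySem.List.pyGetD
                (PySem.List.sorted intervals (fun x => PySem.List.pyGetD x 1 0) false) 0 []) 1 0)
            (PySem.List.slice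
              (PySem.List.sorted intervals (fun x => PySem.List.pyGetD x 1 0) false)
              (some 1) none)).1 = 1 + pvCountA (pvEn first) S
        rw [show PySem.List.sorted intervals (fun x => PySem.List.pyGetD x 1 0) false
            = pvSortedEn intervals from rfl, hsort, PySem.List.slice_from_one,
          PySem.List.pyGetD_zero_cons, List.tail_cons, pvFoldA,
          show PySem.List.pyGetD first 1 0 = pvEn first from rfl]
      have hB : get_non_overlap_intervals_alt intervals = 1 + pvCountA (pvEn first) S := by
        show (match PySem.List.min? intervals (fun x => PySem.List.pyGetD x 1 0) with
          | none => 0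
          | some first =>
              pvLoopB ((PySem.List.remove? intervals first).getD intervals)
                (PySem.List.pyGetD first 1 0) 1) = 1 + pvCountA (pvEn first) S
        rw [hminI]
        show pvLoopB ((PySem.List.remove? intervals first).getD intervals)
          (PySem.List.pyGetD first 1 0) 1 = 1 + pvCountA (pvEn first) S
        have hinv : ∀ x ∈ intervals.erase first, pvSt x > pvEn first → pvEn first ≤ pvEn x := by
          intro x hx _
          have := PySem.List.min?_isMin hminI x (List.mem_of_mem_erase hx)
          simpa using this
        rw [pvRemoveGetD, show PySem.List.pyGetD first 1 0 = pvEn first from rfl,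
          pvMain (intervals.erase first).length (intervals.erase first) (pvEn first) 1 le_rfl hinv,
          herase]
      rw [hA, hB]
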